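-- pv_equiv track=rewrite | github.com/Vinicius007700/Hackathon-Nasa | backend/veirfy.py | get_full_event_chain_ids
-- ===== SOURCE A (Python) =====
-- from collections import deque
--
-- def get_full_event_chain_ids(start_id, master_cache):
--     """Rastreia recursivamente TODOS os eventos ligados, não importa a profundidade."""
--     if start_id not in master_cache: return []
--     chain = set()
--     queue = deque([start_id])
--     while queue:
--         current_id = queue.popleft()
--         if current_id in chain: continue
--         chain.add(current_id)
--         event_details = master_cache.get(current_id, {})
--         for linked_event in event_details.get('linkedEvents') or []:
--             linked_id = linked_event.get('activityID')
--             if linked_id: queue.append(linked_id)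
--     return sorted(list(chain))
-- ===== SOURCE B (Python) =====
-- def get_full_event_chain_ids(start_id, master_cache):
--     """Rastreia recursivamente TODOS os eventos ligados, não importa a profundidade."""
--     if start_id not in master_cache:
--         return []
--     chain = set()
--     def dfs(current_id):
--         if current_id in chain:
--             return
--         chain.add(current_id)
--         for linked_event in master_cache.get(current_id, {}).get('linkedEvents') or []:
--             linked_id = linked_event.get('activityID')
--             if linked_id:
--                 dfs(linked_id)
--     dfs(start_id)
--     return sorted(chain)
-- ===== Notes on version B (the rewrite author's own statement) =====
-- stated objective: alternative
-- what changed: Replaced the explicit deque-based breadth-first worklist loop with a nested recursive depth-first search that threads the shared visited set; both end with sorted(chain), so the traversal order is immaterial.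
import Mathlib
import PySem

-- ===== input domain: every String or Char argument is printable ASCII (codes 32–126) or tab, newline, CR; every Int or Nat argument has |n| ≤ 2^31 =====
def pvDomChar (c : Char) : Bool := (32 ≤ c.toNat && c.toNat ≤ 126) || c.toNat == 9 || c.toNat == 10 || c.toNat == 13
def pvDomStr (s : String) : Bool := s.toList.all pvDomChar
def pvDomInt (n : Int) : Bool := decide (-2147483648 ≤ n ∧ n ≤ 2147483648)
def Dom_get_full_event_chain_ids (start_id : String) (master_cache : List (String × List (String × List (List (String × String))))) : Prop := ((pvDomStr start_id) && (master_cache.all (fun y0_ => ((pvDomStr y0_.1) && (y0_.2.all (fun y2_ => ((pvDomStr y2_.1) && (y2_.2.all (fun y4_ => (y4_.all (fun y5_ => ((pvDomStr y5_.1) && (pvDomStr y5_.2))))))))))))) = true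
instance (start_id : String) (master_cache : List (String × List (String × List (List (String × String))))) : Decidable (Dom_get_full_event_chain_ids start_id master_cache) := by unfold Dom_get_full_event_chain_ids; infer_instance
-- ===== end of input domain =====

-- B replaces A's deque-based BFS by recursive depth-first search carried by a shared visited set
-- (iterative ↔ recursive decomposition); both return sorted(chain), so the traversal order is immaterial.

-- ===== PORT A =====
-- `for linked_event in event_details.get('linkedEvents') or []: … if linked_id:` — the truthy linked
-- ids extracted from a 'linkedEvents' value (shared by both ports, as in both Pythons):
def pvLinkIds (les : List (List (String × String))) : List String :=
  les.filterMap (fun le =>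
    match (PySem.Dict.mk le).get? "activityID" with
    | some lid => if lid = "" then none else some lid
    | none => none)

-- the truthy linked ids of `master_cache.get(id, {})` ('or []' : a missing or empty 'linkedEvents' gives [])
def pvLinked (mc : List (String × List (String × List (List (String × String))))) (id : String) : List String :=
  pvLinkIds ((PySem.Dict.mk ((PySem.Dict.mk mc).getD id [])).getD "linkedEvents" [])

-- Every id either BFS's queue or DFS's recursion can ever see (used only as a termination measure):
def pvUniv (mc : List (String × List (String × List (List (String × String))))) (start : String) : List String :=
  start :: mc.flatMap (fun kv => pvLinkIds ((PySem.Dict.mk kv.2).getD "linkedEvents" []))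

-- termination helper lemmas (cited by the ports' decreasing_by)
theorem pvFilter_mono {α : Type} (l : List α) (p q : α → Bool) (h : ∀ x ∈ l, p x = true → q x = true) :
    (l.filter p).length ≤ (l.filter q).length := by
  induction l with
  | nil => simp
  | cons a t ih =>
    have ih' := ih (fun x hx => h x (List.mem_cons_of_mem _ hx))
    by_cases hp : p a <;> by_cases hq : q a <;> simp [hp, hq] at * <;> omega

theorem pvFilter_strict {α : Type} (l : List α) (p q : α → Bool) (h : ∀ x ∈ l, p x = true → q x = true)
    (a : α) (ha : a ∈ l) (hqa : q a = true) (hpa : p a = false) :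
    (l.filter p).length < (l.filter q).length := by
  induction l with
  | nil => simp at ha
  | cons b t ih =>
    have hmono := pvFilter_mono t p q (fun x hx => h x (List.mem_cons_of_mem _ hx))
    rcases List.mem_cons.1 ha with rfl | hat
    · simp [hpa, hqa]
      omega
    · have ih' := ih (fun x hx => h x (List.mem_cons_of_mem _ hx)) hat
      by_cases hp : p b <;> by_cases hq : q b <;>
        simp only [List.filter_cons, hp, hq, if_pos, List.length_cons, Bool.false_eq_true, ite_false] <;> first | omega | (exact absurd (h b (List.mem_cons_self) hp) (by simp [hq]))

theorem pvContains_anti {s t : List String} (hsub : ∀ x ∈ s, x ∈ t) (x : String)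
    (h : (!t.contains x) = true) : (!s.contains x) = true := by
  simp only [Bool.not_eq_true', ← Bool.not_eq_true, List.contains_iff_mem] at *
  exact fun hx => h (hsub x hx)

theorem pvContains_of_not_mem {s : List String} (x : String) (h : x ∉ s) : (!s.contains x) = true := by
  simp only [Bool.not_eq_true', ← Bool.not_eq_true, List.contains_iff_mem]
  exact h

theorem pvContains_of_mem {s : List String} (x : String) (h : x ∈ s) : (!s.contains x) = false := by
  simp [h]

theorem pvMem_flatMap_length {α β : Type} (f : α → List β) {l : List α} {a : α} (h : a ∈ l) :
    (f a).length ≤ (l.flatMap f).length := by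
  induction l with
  | nil => simp at h
  | cons b t ih =>
    simp only [List.flatMap_cons, List.length_append]
    rcases List.mem_cons.1 h with rfl | hbt
    · omega
    · have := ih hbt; omega

theorem pvLinked_eq_nil (mc : List (String × List (String × List (List (String × String)))))
    (id : String) (h : (PySem.Dict.mk mc).getD id [] = []) : pvLinked mc id = [] := by
  unfold pvLinked
  rw [h]
  rfl

theorem pvGetD_cases (mc : List (String × List (String × List (List (String × String))))) (id : String) :
    (PySem.Dict.mk mc).getD id [] = [] ∨ ∃ kv ∈ mc, (PySem.Dict.mk mc).getD id [] = kv.2 := by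
  induction mc with
  | nil => left; rfl
  | cons kv t ih =>
    obtain ⟨k, v⟩ := kv
    by_cases hk : k == id
    · right
      refine ⟨(k, v), List.mem_cons_self, ?_⟩
      simp [PySem.Dict.getD_eq_get?_getD, PySem.Dict.get?_mk_cons, hk]
    · have : (PySem.Dict.mk ((k, v) :: t)).getD id [] = (PySem.Dict.mk t).getD id [] := by
        simp [PySem.Dict.getD_eq_get?_getD, PySem.Dict.get?_mk_cons, hk]
      rw [this]
      rcases ih with h | ⟨kv', hkv', h⟩
      · left; exact h
      · right; exact ⟨kv', List.mem_cons_of_mem _ hkv', h⟩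

theorem pvLinked_mem_univ (mc : List (String × List (String × List (List (String × String)))))
    (start id x : String) (hx : x ∈ pvLinked mc id) : x ∈ pvUniv mc start := by
  rcases pvGetD_cases mc id with h | ⟨kv, hkv, h⟩
  · rw [pvLinked_eq_nil mc id h] at hx
    simp at hx
  · unfold pvLinked at hx
    rw [h] at hx
    exact List.mem_cons_of_mem _ (List.mem_flatMap.2 ⟨kv, hkv, hx⟩)

theorem pvLinked_length (mc : List (String × List (String × List (List (String × String)))))
    (id : String) : (pvLinked mc id).length + 1 ≤ (pvUniv mc id).length := by
  rcases pvGetD_cases mc id with h | ⟨kv, hkv, h⟩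
  · rw [pvLinked_eq_nil mc id h]
    simp [pvUniv]
  · unfold pvLinked
    rw [h]
    have h2 : (pvLinkIds ((PySem.Dict.mk kv.2).getD "linkedEvents" [])).length
        ≤ (mc.flatMap (fun kv => pvLinkIds ((PySem.Dict.mk kv.2).getD "linkedEvents" []))).length :=
      pvMem_flatMap_length (f := fun kv => pvLinkIds ((PySem.Dict.mk kv.2).getD "linkedEvents" [])) hkv
    simp only [pvUniv, List.length_cons]
    omega

-- pvUniv is independent of its `start` head except for that head's position:
theorem pvLinked_length' (mc : List (String × List (String × List (List (String × String)))))
    (start id : String) : (pvLinked mc id).length + 1 ≤ (pvUniv mc start).length := by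
  have := pvLinked_length mc id
  simp only [pvUniv, List.length_cons] at *
  omega

-- the BFS loop of A: pop left; skip if visited; else mark visited and append the linked ids.
-- (the hypothesis argument hq and the measure only make the literal loop well-founded)
def pvBfs (mc : List (String × List (String × List (List (String × String))))) (start : String)
    (chain : PySem.Set String) (queue : List String)
    (hq : ∀ x ∈ queue, x ∈ pvUniv mc start) : PySem.Set String :=
  match queue with
  | [] => chain
  | current :: rest =>
    if hmem : current ∈ chain then
      pvBfs mc start chain rest (fun x hx => hq x (List.mem_cons_of_mem _ hx))
    else
      pvBfs mc start (PySem.Set.add chain current) (rest ++ pvLinked mc current)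
        (fun x hx => (List.mem_append.1 hx).elim
          (fun h => hq x (List.mem_cons_of_mem _ h))
          (fun h => pvLinked_mem_univ mc start current x h))
termination_by
  ((pvUniv mc start).filter (fun x => !chain.contains x)).length * ((pvUniv mc start).length + 2)
    + queue.length
decreasing_by
  · simp only [List.length_cons]
    omega
  · have hcur : current ∈ pvUniv mc start := hq current List.mem_cons_self
    have hstrict :
        ((pvUniv mc start).filter (fun x => !(PySem.Set.add chain current).contains x)).length
          < ((pvUniv mc start).filter (fun x => !chain.contains x)).length := by
      apply pvFilter_strict _ _ _ ?_ current hcur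
        (pvContains_of_not_mem _ hmem)
        (pvContains_of_mem _ ((PySem.Set.mem_add _ _ _).2 (Or.inr rfl)))
      intro x _ hx
      exact pvContains_anti (fun y hy => by simp [PySem.Set.mem_add, hy]) x hx
    have hlen : (pvLinked mc current).length + 1 ≤ (pvUniv mc start).length :=
      pvLinked_length' mc start current
    set C := (pvUniv mc start).length + 2
    set F' := ((pvUniv mc start).filter (fun x => !(PySem.Set.add chain current).contains x)).length
    set F := ((pvUniv mc start).filter (fun x => !chain.contains x)).length
    have hmul : F' * C + C ≤ F * C := by
      have : (F' + 1) * C ≤ F * C := Nat.mul_le_mul_right C hstrict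
      nlinarith
    simp only [List.length_append, List.length_cons]
    omega

-- ===== PORT B =====
-- The recursive dfs of B: the subtype result (everything already in `chain` stays in the result) and
-- the hypothesis hi are only devices for well-foundedness; the ids list is the pending linked events
-- of the current for-loop, so `dfs(linked_id)` inside the loop is the nested recursive call below.
def pvDfs (mc : List (String × List (String × List (List (String × String))))) (start : String)
    (chain : PySem.Set String) (ids : List String)
    (hi : ∀ x ∈ ids, x ∈ pvUniv mc start) :
    {s : PySem.Set String // ∀ x ∈ chain, x ∈ s} :=
  match ids with
  | [] => ⟨chain, fun _ hx => hx⟩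
  | id :: rest =>
    if hmem : id ∈ chain then
      pvDfs mc start chain rest (fun x hx => hi x (List.mem_cons_of_mem _ hx))
    else
      let inner := pvDfs mc start (PySem.Set.add chain id) (pvLinked mc id)
        (fun x hx => pvLinked_mem_univ mc start id x hx)
      let outer := pvDfs mc start inner.1 rest (fun x hx => hi x (List.mem_cons_of_mem _ hx))
      ⟨outer.1, fun x hx => outer.2 x (inner.2 x ((PySem.Set.mem_add _ _ _).2 (Or.inl hx)))⟩
termination_by
  (((pvUniv mc start).filter (fun x => !chain.contains x)).length, ids.length)
decreasing_by
  · exact Prod.Lex.right _ (by simp)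
  · apply Prod.Lex.left
    apply pvFilter_strict _ _ _ ?_ id (hi id List.mem_cons_self)
      (pvContains_of_not_mem _ hmem)
      (pvContains_of_mem _ ((PySem.Set.mem_add _ _ _).2 (Or.inr rfl)))
    intro x _ hx
    exact pvContains_anti (fun y hy => by simp [PySem.Set.mem_add, hy]) x hx
  · apply Prod.Lex.left
    have h2 : ((pvUniv mc start).filter (fun x => !(PySem.Set.add chain id).contains x)).length
        < ((pvUniv mc start).filter (fun x => !chain.contains x)).length := by
      apply pvFilter_strict _ _ _ ?_ id (hi id List.mem_cons_self)
        (pvContains_of_not_mem _ hmem)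
        (pvContains_of_mem _ ((PySem.Set.mem_add _ _ _).2 (Or.inr rfl)))
      intro x _ hx
      exact pvContains_anti (fun y hy => by simp [PySem.Set.mem_add, hy]) x hx
    exact lt_of_le_of_lt
      (pvFilter_mono _ _ _ (fun x _ hx => pvContains_anti (fun y hy => inner.2 y hy) x hx)) h2

def get_full_event_chain_ids (start_id : String) (master_cache : List (String × List (String × List (List (String × String))))) : List String :=
  if (PySem.Dict.mk master_cache).contains start_id then
    PySem.List.sorted
      (pvBfs master_cache start_id PySem.Set.empty [start_id]
        (fun x hx => by simp at hx; simp [hx, pvUniv]))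
      (fun x => x) false
  else []

def get_full_event_chain_ids_alt (start_id : String) (master_cache : List (String × List (String × List (List (String × String))))) : List String :=
  if (PySem.Dict.mk master_cache).contains start_id then
    PySem.List.sorted
      (pvDfs master_cache start_id PySem.Set.empty [start_id]
        (fun x hx => by simp at hx; simp [hx, pvUniv])).1
      (fun x => x) false
  else []

-- ===== PRECONDITION & SPEC =====
def Spec_get_full_event_chain_ids (start_id : String) (master_cache : List (String × List (String × List (List (String × String))))) (out : List String) : Prop := out = get_full_event_chain_ids_alt start_id master_cache
instance (start_id : String) (master_cache : List (String × List (String × List (List (String × String))))) (out : List String) : Decidable (Spec_get_full_event_chain_ids start_id master_cache out) := by unfold Spec_get_full_event_chain_ids; infer_instance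

-- ===== CLAIM (what is proved, stated in full; the proofs are below) =====
def Claim_equal_get_full_event_chain_ids : Prop := ∀ (start_id : String) (master_cache : List (String × List (String × List (List (String × String))))), Dom_get_full_event_chain_ids start_id master_cache → Spec_get_full_event_chain_ids start_id master_cache (get_full_event_chain_ids start_id master_cache)

-- ===== LEMMAS AND PROOFS =====

-- reachability along truthy linked ids: the semantic set both traversals compute
def pvReach (mc : List (String × List (String × List (List (String × String))))) (start x : String) : Prop :=
  Relation.ReflTransGen (fun a b => b ∈ pvLinked mc a) start x

theorem pvBfs_mono (mc : List (String × List (String × List (List (String × String))))) (start : String)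
    (chain : PySem.Set String) (queue : List String) (hq : ∀ x ∈ queue, x ∈ pvUniv mc start) :
    ∀ x ∈ chain, x ∈ pvBfs mc start chain queue hq := by
  fun_induction pvBfs with
  | case1 chain hq1 hq2 => exact fun x hx => hx
  | case2 chain current rest hq1 hmem hq2 ih => exact ih
  | case3 chain current rest hq1 hmem hq2 ih =>
    intro x hx
    exact ih x ((PySem.Set.mem_add _ _ _).2 (Or.inl hx))

theorem pvBfs_queue (mc : List (String × List (String × List (List (String × String))))) (start : String)
    (chain : PySem.Set String) (queue : List String) (hq : ∀ x ∈ queue, x ∈ pvUniv mc start) :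
    ∀ x ∈ queue, x ∈ pvBfs mc start chain queue hq := by
  fun_induction pvBfs with
  | case1 chain hq1 hq2 => exact fun x hx => absurd hx (List.not_mem_nil)
  | case2 chain current rest hq1 hmem hq2 ih =>
    intro x hx
    rcases List.mem_cons.1 hx with rfl | hxr
    · exact pvBfs_mono mc start chain rest _ x hmem
    · exact ih x hxr
  | case3 chain current rest hq1 hmem hq2 ih =>
    intro x hx
    rcases List.mem_cons.1 hx with rfl | hxr
    · exact pvBfs_mono mc start _ _ _ x ((PySem.Set.mem_add _ _ _).2 (Or.inr rfl))
    · exact ih x (List.mem_append_left _ hxr)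

theorem pvBfs_closed (mc : List (String × List (String × List (List (String × String))))) (start : String)
    (chain : PySem.Set String) (queue : List String) (hq : ∀ x ∈ queue, x ∈ pvUniv mc start)
    (hcq : ∀ c ∈ chain, ∀ y ∈ pvLinked mc c, y ∈ chain ∨ y ∈ queue) :
    ∀ c ∈ pvBfs mc start chain queue hq, ∀ y ∈ pvLinked mc c, y ∈ pvBfs mc start chain queue hq := by
  revert hcq
  fun_induction pvBfs with
  | case1 chain hq1 hq2 =>
    intro hcq c hc y hy
    rcases hcq c hc y hy with h | h
    · exact h
    · exact absurd h (List.not_mem_nil)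
  | case2 chain current rest hq1 hmem hq2 ih =>
    intro hcq
    apply ih
    intro c hc y hy
    rcases hcq c hc y hy with h | h
    · exact Or.inl h
    · rcases List.mem_cons.1 h with rfl | hyr
      · exact Or.inl hmem
      · exact Or.inr hyr
  | case3 chain current rest hq1 hmem hq2 ih =>
    intro hcq
    apply ih
    intro c hc y hy
    rcases (PySem.Set.mem_add _ _ _).1 hc with hcc | rfl
    · rcases hcq c hcc y hy with h | h
      · exact Or.inl ((PySem.Set.mem_add _ _ _).2 (Or.inl h))
      · rcases List.mem_cons.1 h with rfl | hyr
        · exact Or.inl ((PySem.Set.mem_add _ _ _).2 (Or.inr rfl))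
        · exact Or.inr (List.mem_append_left _ hyr)
    · exact Or.inr (List.mem_append_right _ hy)

theorem pvBfs_sound (mc : List (String × List (String × List (List (String × String))))) (start : String)
    (chain : PySem.Set String) (queue : List String) (hq : ∀ x ∈ queue, x ∈ pvUniv mc start)
    (R : String → Prop) (hstep : ∀ a b, R a → b ∈ pvLinked mc a → R b)
    (hc : ∀ x ∈ chain, R x) (hqq : ∀ x ∈ queue, R x) :
    ∀ x ∈ pvBfs mc start chain queue hq, R x := by
  revert hc hqq
  fun_induction pvBfs with
  | case1 chain hq1 hq2 => exact fun hc _ => hc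
  | case2 chain current rest hq1 hmem hq2 ih =>
    intro hc hqq
    exact ih hc (fun x hx => hqq x (List.mem_cons_of_mem _ hx))
  | case3 chain current rest hq1 hmem hq2 ih =>
    intro hc hqq
    apply ih
    · intro x hx
      rcases (PySem.Set.mem_add _ _ _).1 hx with hxc | rfl
      · exact hc x hxc
      · exact hqq x List.mem_cons_self
    · intro x hx
      rcases List.mem_append.1 hx with h | h
      · exact hqq x (List.mem_cons_of_mem _ h)
      · exact hstep current x (hqq current List.mem_cons_self) h

theorem pvBfs_nodup (mc : List (String × List (String × List (List (String × String))))) (start : String)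
    (chain : PySem.Set String) (queue : List String) (hq : ∀ x ∈ queue, x ∈ pvUniv mc start)
    (hn : chain.Nodup) : (pvBfs mc start chain queue hq).Nodup := by
  revert hn
  fun_induction pvBfs with
  | case1 chain hq1 hq2 => exact fun hn => hn
  | case2 chain current rest hq1 hmem hq2 ih => exact ih
  | case3 chain current rest hq1 hmem hq2 ih => exact fun hn => ih (PySem.Set.nodup_add _ _ hn)

theorem pvDfs_ids (mc : List (String × List (String × List (List (String × String))))) (start : String)
    (chain : PySem.Set String) (ids : List String) (hi : ∀ x ∈ ids, x ∈ pvUniv mc start) :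
    ∀ x ∈ ids, x ∈ (pvDfs mc start chain ids hi).1 := by
  fun_induction pvDfs with
  | case1 chain hi1 hi2 => exact fun x hx => absurd hx (List.not_mem_nil)
  | case2 chain id rest hi1 hmem hi2 ih =>
    intro x hx
    rcases List.mem_cons.1 hx with rfl | hxr
    · exact (pvDfs mc start chain rest _).2 x hmem
    · exact ih x hxr
  | case3 chain id rest hi1 hmem inner outer hi2 ih3 ih2 ih1 =>
    intro x hx
    rcases List.mem_cons.1 hx with rfl | hxr
    · exact outer.2 x (inner.2 x ((PySem.Set.mem_add _ _ _).2 (Or.inr rfl)))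
    · exact ih2 x hxr

theorem pvDfs_closed (mc : List (String × List (String × List (List (String × String))))) (start : String)
    (chain : PySem.Set String) (ids : List String) (hi : ∀ x ∈ ids, x ∈ pvUniv mc start) :
    ∀ x ∈ (pvDfs mc start chain ids hi).1,
      x ∈ chain ∨ ∀ y ∈ pvLinked mc x, y ∈ (pvDfs mc start chain ids hi).1 := by
  fun_induction pvDfs with
  | case1 chain hi1 hi2 => exact fun x hx => Or.inl hx
  | case2 chain id rest hi1 hmem hi2 ih => exact ih
  | case3 chain id rest hi1 hmem inner outer hi2 ih3 ih2 ih1 =>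
    intro x hx
    rcases ih2 x hx with hxi | hcl
    · rcases ih3 x hxi with hxa | hcl
      · rcases (PySem.Set.mem_add _ _ _).1 hxa with hxc | rfl
        · exact Or.inl hxc
        · refine Or.inr (fun y hy => ?_)
          exact outer.2 y
            (pvDfs_ids mc start (PySem.Set.add chain x) (pvLinked mc x) _ y hy)
      · exact Or.inr (fun y hy => outer.2 y (hcl y hy))
    · exact Or.inr hcl

theorem pvDfs_sound (mc : List (String × List (String × List (List (String × String))))) (start : String)
    (chain : PySem.Set String) (ids : List String) (hi : ∀ x ∈ ids, x ∈ pvUniv mc start)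
    (R : String → Prop) (hstep : ∀ a b, R a → b ∈ pvLinked mc a → R b)
    (hc : ∀ x ∈ chain, R x) (hii : ∀ x ∈ ids, R x) :
    ∀ x ∈ (pvDfs mc start chain ids hi).1, R x := by
  revert hc hii
  fun_induction pvDfs with
  | case1 chain hi1 hi2 => exact fun hc _ => hc
  | case2 chain id rest hi1 hmem hi2 ih =>
    intro hc hii
    exact ih hc (fun x hx => hii x (List.mem_cons_of_mem _ hx))
  | case3 chain id rest hi1 hmem inner outer hi2 ih3 ih2 ih1 =>
    intro hc hii
    apply ih2
    · apply ih3
      · intro x hx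
        rcases (PySem.Set.mem_add _ _ _).1 hx with hxc | rfl
        · exact hc x hxc
        · exact hii x List.mem_cons_self
      · exact fun x hx => hstep id x (hii id List.mem_cons_self) hx
    · exact fun x hx => hii x (List.mem_cons_of_mem _ hx)

theorem pvDfs_nodup (mc : List (String × List (String × List (List (String × String))))) (start : String)
    (chain : PySem.Set String) (ids : List String) (hi : ∀ x ∈ ids, x ∈ pvUniv mc start)
    (hn : chain.Nodup) : (pvDfs mc start chain ids hi).1.Nodup := by
  revert hn
  fun_induction pvDfs with
  | case1 chain hi1 hi2 => exact fun hn => hn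
  | case2 chain id rest hi1 hmem hi2 ih => exact ih
  | case3 chain id rest hi1 hmem inner outer hi2 ih3 ih2 ih1 => exact fun hn => ih2 (ih3 (PySem.Set.nodup_add _ _ hn))

theorem pvBfs_mem (mc : List (String × List (String × List (List (String × String))))) (start : String)
    (hq : ∀ x ∈ [start], x ∈ pvUniv mc start) (x : String) :
    x ∈ pvBfs mc start PySem.Set.empty [start] hq ↔ pvReach mc start x := by
  constructor
  · exact pvBfs_sound mc start _ _ hq (pvReach mc start)
      (fun a b ha hb => Relation.ReflTransGen.tail ha hb)
      (fun y hy => absurd hy (List.not_mem_nil))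
      (fun y hy => by rcases List.mem_singleton.1 hy with rfl; exact Relation.ReflTransGen.refl)
      x
  · intro h
    induction h with
    | refl => exact pvBfs_queue mc start _ _ hq start (List.mem_singleton.2 rfl)
    | tail h1 h2 ih =>
      exact pvBfs_closed mc start _ _ hq (fun c hc => absurd hc (List.not_mem_nil)) _ ih _ h2

theorem pvDfs_mem (mc : List (String × List (String × List (List (String × String))))) (start : String)
    (hi : ∀ x ∈ [start], x ∈ pvUniv mc start) (x : String) :
    x ∈ (pvDfs mc start PySem.Set.empty [start] hi).1 ↔ pvReach mc start x := by
  constructor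
  · exact pvDfs_sound mc start _ _ hi (pvReach mc start)
      (fun a b ha hb => Relation.ReflTransGen.tail ha hb)
      (fun y hy => absurd hy (List.not_mem_nil))
      (fun y hy => by rcases List.mem_singleton.1 hy with rfl; exact Relation.ReflTransGen.refl)
      x
  · intro h
    induction h with
    | refl => exact pvDfs_ids mc start _ _ hi start (List.mem_singleton.2 rfl)
    | tail h1 h2 ih =>
      rcases pvDfs_closed mc start _ _ hi _ ih with hin | hcl
      · exact absurd hin (List.not_mem_nil)
      · exact hcl _ h2

-- ===== VERDICT (by name: the statement is the Claim_ definition above) =====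
theorem get_full_event_chain_ids_spec : Claim_equal_get_full_event_chain_ids := by
  intro start_id mc _
  unfold Spec_get_full_event_chain_ids get_full_event_chain_ids get_full_event_chain_ids_alt
  by_cases hct : (PySem.Dict.mk mc).contains start_id
  · simp only [hct, if_true]
    apply PySem.List.sorted_eq_sorted_of_perm _ _ _ (fun a b h => h)
    refine (List.perm_ext_iff_of_nodup ?_ ?_).2 ?_
    · exact pvBfs_nodup mc start_id _ _ _ List.nodup_nil
    · exact pvDfs_nodup mc start_id _ _ _ List.nodup_nil
    · intro x
      rw [pvBfs_mem, pvDfs_mem]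
  · simp [hct]
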